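-- pv_equiv track=rewrite | github.com/ZhouRUNLIN/LU3IN003-ALGO2 | codes/projet.py | sol_1_rec
-- ===== SOURCE A (Python) =====
-- def cost_sub(x:str,y:str,i:int,j:int):
--     """
--     Calculer le c_sub de x[i] et y[j]
--     """
--     if x[i-1]==y[j-1]:
--         return 0
--     elif (x[i-1]=='C' and y[j-1]=='G') or (x[i-1]=='G' and y[j-1]=='C') or (x[i-1]=='A' and y[j-1]=='T') or (x[i-1]=='T' and y[j-1]=='A'):
--         return 3
--     else:
--         return 4
--
-- def sol_1_rec(T:list,x:str,y:str,i:int,j:int):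
--     if i==0 and j==0:
--         return ("","")
--     if i==0:
--         return ("-"*j,y[0:j])
--     if j==0:
--         return (x[0:i],"-"*i)
--     a=T[i-1][j-1]+cost_sub(x,y,i,j)
--     b=T[i-1][j]+2
--     c=T[i][j-1]+2
--     if a==T[i][j]:
--         al_x,al_y=sol_1_rec(T,x,y,i-1,j-1)
--         return (al_x+x[i-1],al_y+y[j-1])
--     if b==T[i][j]:
--         al_x,al_y=sol_1_rec(T,x,y,i-1,j)
--         return (al_x+x[i-1],al_y+"-")
--     al_x,al_y=sol_1_rec(T,x,y,i,j-1)
--     return (al_x+"-",al_y+y[j-1])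
-- ===== SOURCE B (Python) =====
-- def sol_1_rec(T:list, x:str, y:str, i:int, j:int):
--     # two-phase backtrace: record the move sequence, then rebuild the
--     # alignment forward from the border (return value only)
--     pairs = {('C','G'),('G','C'),('A','T'),('T','A')}
--     ops = []
--     while i != 0 and j != 0:
--         t = T[i][j]
--         if T[i-1][j-1] + (0 if x[i-1]==y[j-1] else 3 if (x[i-1],y[j-1]) in pairs else 4) == t:
--             ops.append('D'); i -= 1; j -= 1
--         elif T[i-1][j] + 2 == t:
--             ops.append('U'); i -= 1
--         else:
--             ops.append('L'); j -= 1
--     if i == 0: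
--         ax, ay = '-'*j, y[0:j]
--     else:
--         ax, ay = x[0:i], '-'*i
--     for op in reversed(ops):
--         if op == 'D':
--             ax += x[i]; ay += y[j]; i += 1; j += 1
--         elif op == 'U':
--             ax += x[i]; ay += '-'; i += 1
--         else:
--             ax += '-'; ay += y[j]; j += 1
--     return (ax, ay)
-- ===== Notes on version B (the rewrite author's own statement) =====
-- stated objective: alternative
-- what changed: Replaces A's recursive backtrace by a two-phase iterative algorithm: phase 1 walks the table down to a border recording only a move sequence ('D'/'U'/'L'), phase 2 emits the border block and then rebuilds both alignment strings forward from the border by folding over the reversed moves with ascending indices.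
-- outside the precondition, e.g. on sol_1_rec([[0], [9, 0], [9, 9]], 'AA', 'A', 2, 1): A returns ('AA', '-A'), B returns ('AA', '-A'); on sol_1_rec([[5, 9], [9, 5]], 'A', 'AB', 1, -1): A returns ('A', 'A'), B returns ('A', 'A')
import Mathlib
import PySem

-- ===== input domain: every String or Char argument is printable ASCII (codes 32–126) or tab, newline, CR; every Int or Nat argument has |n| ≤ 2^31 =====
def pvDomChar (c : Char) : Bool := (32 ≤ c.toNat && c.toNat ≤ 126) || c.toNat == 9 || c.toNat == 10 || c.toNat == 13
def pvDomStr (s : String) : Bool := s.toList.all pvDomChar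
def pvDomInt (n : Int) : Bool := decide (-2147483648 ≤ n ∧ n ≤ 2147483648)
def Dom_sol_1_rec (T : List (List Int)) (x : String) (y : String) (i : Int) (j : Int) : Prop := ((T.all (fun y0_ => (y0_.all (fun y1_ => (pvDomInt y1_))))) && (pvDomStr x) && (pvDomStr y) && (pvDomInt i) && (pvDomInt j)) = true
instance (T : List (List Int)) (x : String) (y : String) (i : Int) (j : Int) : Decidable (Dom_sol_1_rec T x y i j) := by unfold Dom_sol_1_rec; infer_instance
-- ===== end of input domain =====

-- B replaces A's recursive backtrace by a two-phase iterative one: record the move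
-- sequence, then rebuild both strings forward from the border (return value only).

-- ===== PORT A =====
-- cost_sub: x[i-1] / y[j-1] ported with pyGetD; exact under Pre_ (the indices are in range there)
def pvCostSub (x y : List Char) (i j : Int) : Int :=
  let xc := PySem.List.pyGetD x (i - 1) ' '
  let yc := PySem.List.pyGetD y (j - 1) ' '
  if xc = yc then 0
  else if (xc = 'C' ∧ yc = 'G') ∨ (xc = 'G' ∧ yc = 'C') ∨ (xc = 'A' ∧ yc = 'T') ∨ (xc = 'T' ∧ yc = 'A') then 3
  else 4

-- A's recursion, step for step; a fuel parameter makes it total (Pre_ guarantees the fuel chosen by the wrapper is never exhausted); table lookups via pyGetD, exact under Pre_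
def pvSolGoA (T : List (List Int)) (x y : List Char) : Nat → Int → Int → List Char × List Char
  | 0, _, _ => ([], [])
  | fuel + 1, i, j =>
    if i = 0 ∧ j = 0 then ([], [])
    else if i = 0 then (PySem.List.pyRepeat ['-'] j, PySem.List.slice y (some 0) (some j))
    else if j = 0 then (PySem.List.slice x (some 0) (some i), PySem.List.pyRepeat ['-'] i)
    else
      let a := PySem.List.pyGetD (PySem.List.pyGetD T (i - 1) []) (j - 1) 0 + pvCostSub x y i j
      let b := PySem.List.pyGetD (PySem.List.pyGetD T (i - 1) []) j 0 + 2
      let _c := PySem.List.pyGetD (PySem.List.pyGetD T i []) (j - 1) 0 + 2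
      let tij := PySem.List.pyGetD (PySem.List.pyGetD T i []) j 0
      if a = tij then
        let p := pvSolGoA T x y fuel (i - 1) (j - 1)
        (p.1 ++ [PySem.List.pyGetD x (i - 1) ' '], p.2 ++ [PySem.List.pyGetD y (j - 1) ' '])
      else if b = tij then
        let p := pvSolGoA T x y fuel (i - 1) j
        (p.1 ++ [PySem.List.pyGetD x (i - 1) ' '], p.2 ++ ['-'])
      else
        let p := pvSolGoA T x y fuel i (j - 1)
        (p.1 ++ ['-'], p.2 ++ [PySem.List.pyGetD y (j - 1) ' '])

def sol_1_rec (T : List (List Int)) (x : String) (y : String) (i : Int) (j : Int) : String × String :=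
  let p := pvSolGoA T x.toList y.toList (i.toNat + j.toNat + 1) i j
  (String.ofList p.1, String.ofList p.2)

-- ===== PORT B =====
-- phase 1 of B: the while-loop that only records moves ('D'/'U'/'L') and returns the
-- border indices; same fuel device as port A (never exhausted under Pre_); substitution
-- cost computed inline via the pair table, as Source B does
def pvMoves (T : List (List Int)) (x y : List Char) : Nat → Int → Int → List Char → Int × Int × List Char
  | 0, i, j, ops => (i, j, ops)
  | fuel + 1, i, j, ops =>
    if i ≠ 0 ∧ j ≠ 0 then
      let t := PySem.List.pyGetD (PySem.List.pyGetD T i []) j 0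
      let xc := PySem.List.pyGetD x (i - 1) ' '
      let yc := PySem.List.pyGetD y (j - 1) ' '
      if PySem.List.pyGetD (PySem.List.pyGetD T (i - 1) []) (j - 1) 0 +
           (if xc = yc then 0
            else if (xc, yc) ∈ [('C','G'), ('G','C'), ('A','T'), ('T','A')] then (3 : Int) else 4) = t then
        pvMoves T x y fuel (i - 1) (j - 1) (ops ++ ['D'])
      else if PySem.List.pyGetD (PySem.List.pyGetD T (i - 1) []) j 0 + 2 = t then
        pvMoves T x y fuel (i - 1) j (ops ++ ['U'])
      else
        pvMoves T x y fuel i (j - 1) (ops ++ ['L'])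
    else (i, j, ops)

-- phase 2 of B: one fold step of the forward rebuild; state is (ax, ay, i, j)
def pvStep (x y : List Char) (s : List Char × List Char × Int × Int) (op : Char) : List Char × List Char × Int × Int :=
  if op = 'D' then
    (s.1 ++ [PySem.List.pyGetD x s.2.2.1 ' '], s.2.1 ++ [PySem.List.pyGetD y s.2.2.2 ' '], s.2.2.1 + 1, s.2.2.2 + 1)
  else if op = 'U' then
    (s.1 ++ [PySem.List.pyGetD x s.2.2.1 ' '], s.2.1 ++ ['-'], s.2.2.1 + 1, s.2.2.2)
  else
    (s.1 ++ ['-'], s.2.1 ++ [PySem.List.pyGetD y s.2.2.2 ' '], s.2.2.1, s.2.2.2 + 1)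

def sol_1_rec_alt (T : List (List Int)) (x : String) (y : String) (i : Int) (j : Int) : String × String :=
  let m := pvMoves T x.toList y.toList (i.toNat + j.toNat + 1) i j []
  let init : List Char × List Char × Int × Int :=
    if m.1 = 0 then (List.replicate m.2.1.toNat '-', PySem.List.slice y.toList (some 0) (some m.2.1), m.1, m.2.1)
    else (PySem.List.slice x.toList (some 0) (some m.1), List.replicate m.1.toNat '-', m.1, m.2.1)
  let r := m.2.2.reverse.foldl (pvStep x.toList y.toList) init
  (String.ofList r.1, String.ofList r.2.1)

-- ===== PRECONDITION & SPEC =====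
-- Pre_ excludes (a) inputs whose backtrace reads a table or string index out of range (A raises IndexError); which
-- entries are read depends on the table's values, so Pre_ conservatively requires the whole rectangle of entries
-- T[i'][j'], i' ≤ i, j' ≤ j, to exist, thereby also excluding some ragged tables on which A's one path stays in range
-- and A returns; and (b) inputs where a negative i or j reaches the comparison region, where whether A returns at all
-- depends on the table's values and is not expressible in closed form. On every excluded input on which A returns, B
-- returns the same value.
def Pre_sol_1_rec (T : List (List Int)) (x : String) (y : String) (i : Int) (j : Int) : Prop :=
  (0 ≤ i ∧ 0 ≤ j ∧ (0 < i ∧ 0 < j →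
      i ≤ (x.toList.length : Int) ∧ j ≤ (y.toList.length : Int) ∧ i < (T.length : Int) ∧
      ∀ r ∈ T.take (i.toNat + 1), j < (r.length : Int)))
  ∨ (i = 0 ∧ j < 0) ∨ (j = 0 ∧ i < 0)
instance (T : List (List Int)) (x : String) (y : String) (i : Int) (j : Int) : Decidable (Pre_sol_1_rec T x y i j) := by unfold Pre_sol_1_rec; infer_instance

def pvWitness_sol_1_rec : List (List Int) × String × String × Int × Int := ([[0, 2], [2, 0]], "A", "A", 1, 1)

def Spec_sol_1_rec (T : List (List Int)) (x : String) (y : String) (i : Int) (j : Int) (out : String × String) : Prop := out = sol_1_rec_alt T x y i j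
instance (T : List (List Int)) (x : String) (y : String) (i : Int) (j : Int) (out : String × String) : Decidable (Spec_sol_1_rec T x y i j out) := by unfold Spec_sol_1_rec; infer_instance

-- ===== CLAIM (what is proved, stated in full; the proofs are below) =====
def Claim_equal_sol_1_rec : Prop := ∀ (T : List (List Int)) (x : String) (y : String) (i : Int) (j : Int), Dom_sol_1_rec T x y i j → Pre_sol_1_rec T x y i j → Spec_sol_1_rec T x y i j (sol_1_rec T x y i j)

-- ===== LEMMAS AND PROOFS =====

-- the value A returns at a border point (i0 = 0 or j0 = 0), phrased as B's init block
def pvBase (x y : List Char) (i0 j0 : Int) : List Char × List Char :=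
  if i0 = 0 then (List.replicate j0.toNat '-', PySem.List.slice y (some 0) (some j0))
  else (PySem.List.slice x (some 0) (some i0), List.replicate i0.toNat '-')

lemma pvBase_eq_A (T : List (List Int)) (x y : List Char) (i j : Int) (f : Nat)
    (h : ¬(i ≠ 0 ∧ j ≠ 0)) (hi : 0 ≤ i) (hj : 0 ≤ j) (hf : 0 < f) :
    pvSolGoA T x y f i j = pvBase x y i j := by
  obtain ⟨f', rfl⟩ : ∃ g, f = g + 1 := ⟨f - 1, by omega⟩
  rcases Classical.em (i = 0) with hi0 | hi0
  · subst hi0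
    rcases Classical.em (j = 0) with hj0 | hj0
    · subst hj0; simp [pvSolGoA, pvBase, PySem.List.slice_to]
    · simp [pvSolGoA, pvBase, hj0, PySem.List.pyRepeat_singleton]
  · have hj0 : j = 0 := by omega
    subst hj0
    simp [pvSolGoA, pvBase, hi0, PySem.List.pyRepeat_singleton]

-- B's inline substitution cost equals A's cost_sub
lemma pvCost_eq (x y : List Char) (i j : Int) :
    (if PySem.List.pyGetD x (i - 1) ' ' = PySem.List.pyGetD y (j - 1) ' ' then (0 : Int)
     else if (PySem.List.pyGetD x (i - 1) ' ', PySem.List.pyGetD y (j - 1) ' ') ∈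
         [('C','G'), ('G','C'), ('A','T'), ('T','A')] then 3 else 4) = pvCostSub x y i j := by
  unfold pvCostSub
  simp only [List.mem_cons, List.not_mem_nil, or_false, Prod.mk.injEq]

-- the invariant: phase 1 records a move list delta; folding pvStep over delta.reverse from the
-- border rebuilds exactly the two suffixes by which A's value extends the border value
lemma pvKey (T : List (List Int)) (x y : List Char) :
    ∀ (n : Nat) (i j : Int), i.toNat + j.toNat ≤ n → 0 ≤ i → 0 ≤ j →
      ∀ (ops : List Char) (fa fb : Nat), i.toNat + j.toNat < fa → i.toNat + j.toNat < fb →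
        ∃ i0 j0 delta d1 d2,
          pvMoves T x y fb i j ops = (i0, j0, ops ++ delta) ∧
          pvSolGoA T x y fa i j = ((pvBase x y i0 j0).1 ++ d1, (pvBase x y i0 j0).2 ++ d2) ∧
          ∀ ax ay : List Char,
            delta.reverse.foldl (pvStep x y) (ax, ay, i0, j0) = (ax ++ d1, ay ++ d2, i, j) := by
  intro n
  induction n with
  | zero =>
    intro i j hn hi hj ops fa fb hfa hfb
    have hij : ¬(i ≠ 0 ∧ j ≠ 0) := by omega
    obtain ⟨fb', rfl⟩ : ∃ g, fb = g + 1 := ⟨fb - 1, by omega⟩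
    refine ⟨i, j, [], [], [], ?_, ?_, ?_⟩
    · simp [pvMoves, hij]
    · simp [pvBase_eq_A T x y i j fa hij hi hj (by omega)]
    · intro ax ay; simp
  | succ n ih =>
    intro i j hn hi hj ops fa fb hfa hfb
    rcases Classical.em (i ≠ 0 ∧ j ≠ 0) with hpos | hneg
    · obtain ⟨fa', rfl⟩ : ∃ g, fa = g + 1 := ⟨fa - 1, by omega⟩
      obtain ⟨fb', rfl⟩ : ∃ g, fb = g + 1 := ⟨fb - 1, by omega⟩
      have h1 : ¬(i = 0 ∧ j = 0) := by omega
      have h2 : ¬(i = 0) := by omega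
      have h3 : ¬(j = 0) := by omega
      rw [pvMoves]
      rw [if_pos hpos]
      rw [pvSolGoA]
      rw [if_neg h1, if_neg h2, if_neg h3]
      dsimp only
      rw [pvCost_eq x y i j]
      split_ifs with ha hb
      · obtain ⟨i0, j0, delta, d1, d2, hm, hA, hf⟩ :=
          ih (i - 1) (j - 1) (by omega) (by omega) (by omega) (ops ++ ['D']) fa' fb' (by omega) (by omega)
        refine ⟨i0, j0, 'D' :: delta, d1 ++ [PySem.List.pyGetD x (i - 1) ' '],
          d2 ++ [PySem.List.pyGetD y (j - 1) ' '], by simpa using hm, by simp [hA], ?_⟩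
        intro ax ay
        simp only [List.reverse_cons, List.foldl_append, hf ax ay, List.foldl_cons, List.foldl_nil]
        simp [pvStep]
      · obtain ⟨i0, j0, delta, d1, d2, hm, hA, hf⟩ :=
          ih (i - 1) j (by omega) (by omega) hj (ops ++ ['U']) fa' fb' (by omega) (by omega)
        refine ⟨i0, j0, 'U' :: delta, d1 ++ [PySem.List.pyGetD x (i - 1) ' '],
          d2 ++ ['-'], by simpa using hm, by simp [hA], ?_⟩
        intro ax ay
        simp only [List.reverse_cons, List.foldl_append, hf ax ay, List.foldl_cons, List.foldl_nil]
        simp [pvStep]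
      · obtain ⟨i0, j0, delta, d1, d2, hm, hA, hf⟩ :=
          ih i (j - 1) (by omega) hi (by omega) (ops ++ ['L']) fa' fb' (by omega) (by omega)
        refine ⟨i0, j0, 'L' :: delta, d1 ++ ['-'],
          d2 ++ [PySem.List.pyGetD y (j - 1) ' '], by simpa using hm, by simp [hA], ?_⟩
        intro ax ay
        simp only [List.reverse_cons, List.foldl_append, hf ax ay, List.foldl_cons, List.foldl_nil]
        simp [pvStep]
    · obtain ⟨fb', rfl⟩ : ∃ g, fb = g + 1 := ⟨fb - 1, by omega⟩
      refine ⟨i, j, [], [], [], ?_, ?_, ?_⟩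
      · simp [pvMoves, hneg]
      · simp [pvBase_eq_A T x y i j fa hneg hi hj (by omega)]
      · intro ax ay; simp

-- ===== VERDICT (by name: the statement is the Claim_ definition above) =====
theorem sol_1_rec_spec : Claim_equal_sol_1_rec := by
  intro T x y i j _ hpre
  show sol_1_rec T x y i j = sol_1_rec_alt T x y i j
  rcases hpre with ⟨hi, hj, _⟩ | ⟨hi0, hj0⟩ | ⟨hj0, hi0⟩
  · unfold sol_1_rec sol_1_rec_alt
    obtain ⟨i0, j0, delta, d1, d2, hm, hA, hf⟩ :=
      pvKey T x.toList y.toList (i.toNat + j.toNat) i j le_rfl hi hj []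
        (i.toNat + j.toNat + 1) (i.toNat + j.toNat + 1) (by omega) (by omega)
    simp only [hm, hA, List.nil_append]
    rcases Classical.em (i0 = 0) with h0 | h0
    · subst h0
      have hf' := hf (List.replicate j0.toNat '-') (PySem.List.slice y.toList (some 0) (some j0))
      simp only [List.foldl_reverse, PySem.List.slice_zero_start] at hf'
      simp [pvBase, hf']
    · have hf' := hf (PySem.List.slice x.toList (some 0) (some i0)) (List.replicate i0.toNat '-')
      simp only [List.foldl_reverse, PySem.List.slice_zero_start] at hf'
      simp [pvBase, h0, hf']
  · subst hi0
    have hj' : ¬(j = 0) := by omega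
    unfold sol_1_rec sol_1_rec_alt
    simp [pvSolGoA, pvMoves, hj', PySem.List.pyRepeat_singleton]
  · subst hj0
    have hi' : ¬(i = 0) := by omega
    unfold sol_1_rec sol_1_rec_alt
    simp [pvSolGoA, pvMoves, hi', PySem.List.pyRepeat_singleton]
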